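-- pv_equiv track=rewrite | github.com/miko7879/programming_problems | Other/dpCoinChange.py | coinChangeUsingEvenNumberOfCoins
-- ===== SOURCE A (Python) =====
-- def coinChangeUsingEvenNumberOfCoins(n, p, t):
--
--     mem = [[0]*(n + 1) for _ in range(t + 1)]
--     mem[0][0] = 1
--
--     for ti in range(1, t + 1):
--         for i in range(1, n + 1):
--             for c in p:
--                 if c > i:
--                     break
--                 mem[ti][i] += mem[ti - 1][i - c]
--
--     return sum([r[n] if i % 2 == 0 else 0 for i, r in enumerate(mem)])
-- ===== SOURCE B (Python) =====
-- def coinChangeUsingEvenNumberOfCoins(n, p, t):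
--     # usable coin prefix for amount i: the coins before the first one exceeding i
--     us = []
--     for i in range(n + 1):
--         u = []
--         for c in p:
--             if c > i:
--                 break
--             u.append(c)
--         us.append(u)
--     # squared transition: for amount i, the multiset of amounts left after removing
--     # an ordered pair of coins (the first removal must leave a valid positive amount)
--     pair = []
--     for i in range(1, n + 1):
--         d = {}
--         for c1 in us[i]:
--             r = i - c1
--             if 1 <= r <= n:
--                 for c2 in us[r]:
--                     j = r - c2
--                     d[j] = d.get(j, 0) + 1
--         pair.append(d)
--     # geometric series in the squared transition: t//2 double-steps from amount 0
--     v = [1] + [0] * n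
--     total = v[n]
--     for _ in range(t // 2):
--         v = [0] + [sum(m * v[j] for j, m in d.items()) for d in pair]
--         total += v[n]
--     return total
-- ===== Notes on version B (the rewrite author's own statement) =====
-- stated objective: alternative
-- what changed: B squares the transition: it precomputes, for each amount, a counter of the amounts reachable by removing an ordered pair of usable coins, then runs t//2 double-steps of this squared transition from the unit vector, accumulating the value at n each step - replacing A's coin-by-coin (t+1)x(n+1) table and its final even-index filtered sum.
import Mathlib
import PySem

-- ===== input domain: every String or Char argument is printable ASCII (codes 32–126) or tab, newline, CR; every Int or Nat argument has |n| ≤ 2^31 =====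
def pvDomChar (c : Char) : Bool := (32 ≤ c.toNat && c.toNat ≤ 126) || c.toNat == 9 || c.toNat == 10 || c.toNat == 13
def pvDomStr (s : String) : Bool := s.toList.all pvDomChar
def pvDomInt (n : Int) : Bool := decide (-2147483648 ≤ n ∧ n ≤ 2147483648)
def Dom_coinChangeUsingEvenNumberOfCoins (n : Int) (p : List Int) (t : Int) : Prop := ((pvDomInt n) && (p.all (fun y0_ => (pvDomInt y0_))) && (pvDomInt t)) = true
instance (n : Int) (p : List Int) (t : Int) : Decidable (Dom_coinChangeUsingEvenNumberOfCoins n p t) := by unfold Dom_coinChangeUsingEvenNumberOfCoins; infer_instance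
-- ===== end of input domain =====

-- B replaces A's coin-by-coin (t+1)×(n+1) table and even-index filtered sum by the
-- squared transition: a per-amount counter of amounts reachable by removing an ordered
-- PAIR of usable coins, precomputed once, then t//2 double-steps from the unit vector
-- accumulating the value at n each step (alternative structure, no timing claim).

-- ===== PORT A =====
-- inner 'for c in p: if c > i: break; mem[ti][i] += mem[ti-1][i-c]'
-- (out-of-range access is Python IndexError; totalized with .getD 0, excluded by Pre_)
def pvInnerA (p : List Int) (i : Int) (prev : List Int) (acc : Int) : Int :=
  match p with
  | [] => acc
  | c :: rest =>
      if c > i then acc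
      else pvInnerA rest i prev (acc + (PySem.List.pyGet? prev (i - c)).getD 0)

-- row ti (ti ≥ 1): mem[ti][0] = 0, mem[ti][i] for i in range(1, n+1)
def pvRowA (n : Int) (p : List Int) (prev : List Int) : List Int :=
  0 :: (PySem.List.pyRange 1 (n + 1) 1).map (fun i => pvInnerA p i prev 0)

-- the rows mem[1..t], each built from the previous one
def pvRowsA (n : Int) (p : List Int) (fuel : Nat) (prev : List Int) : List (List Int) :=
  match fuel with
  | 0 => []
  | f + 1 => let r := pvRowA n p prev; r :: pvRowsA n p f r

-- sum([r[n] if i % 2 == 0 else 0 for i, r in enumerate(mem)]) with an Int counter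
def pvSumEvenA (n : Int) (idx : Int) (rows : List (List Int)) (acc : Int) : Int :=
  match rows with
  | [] => acc
  | r :: rest =>
      pvSumEvenA n (idx + 1) rest
        (acc + (if idx % 2 == 0 then (PySem.List.pyGet? r n).getD 0 else 0))

def coinChangeUsingEvenNumberOfCoins (n : Int) (p : List Int) (t : Int) : Int :=
  let row0 : List Int := 1 :: List.replicate n.toNat 0   -- mem[0] = [1] + [0]*n
  pvSumEvenA n 0 (row0 :: pvRowsA n p t.toNat row0) 0

-- ===== PORT B =====
-- 'u = []; for c in p: if c > i: break; u.append(c)'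
def pvUsable (p : List Int) (i : Int) : List Int :=
  match p with
  | [] => []
  | c :: rest => if c > i then [] else c :: pvUsable rest i

-- 'us = [<usable prefix> for i in range(n + 1)]'
def pvUs (n : Int) (p : List Int) : List (List Int) :=
  (PySem.List.pyRange 0 (n + 1) 1).map (fun i => pvUsable p i)

-- the counter d for one amount i (us[i] / us[r] indexing totalized with .getD [];
-- always in range on the inputs reached)
def pvPairD (us : List (List Int)) (n : Int) (i : Int) : PySem.Dict Int Int :=
  ((PySem.List.pyGet? us i).getD []).foldl
    (fun d c1 =>
      let r := i - c1
      if 1 ≤ r ∧ r ≤ n then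
        ((PySem.List.pyGet? us r).getD []).foldl
          (fun d c2 => d.insert (r - c2) (d.getD (r - c2) 0 + 1)) d
      else d)
    PySem.Dict.empty

-- 'pair = [<counter for i> for i in range(1, n + 1)]'
def pvPair (n : Int) (p : List Int) : List (PySem.Dict Int Int) :=
  (PySem.List.pyRange 1 (n + 1) 1).map (fun i => pvPairD (pvUs n p) n i)

-- 'v = [0] + [sum(m * v[j] for j, m in d.items()) for d in pair]'
def pvStep2 (pair : List (PySem.Dict Int Int)) (v : List Int) : List Int :=
  0 :: pair.map (fun d =>
    d.items.foldl (fun s jm => s + jm.2 * (PySem.List.pyGet? v jm.1).getD 0) 0)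

-- 'for _ in range(t // 2): v = …; total += v[n]'
def pvLoop2 (n : Int) (pair : List (PySem.Dict Int Int)) (fuel : Nat)
    (v : List Int) (total : Int) : Int :=
  match fuel with
  | 0 => total
  | f + 1 =>
      let v' := pvStep2 pair v
      pvLoop2 n pair f v' (total + (PySem.List.pyGet? v' n).getD 0)

def coinChangeUsingEvenNumberOfCoins_alt (n : Int) (p : List Int) (t : Int) : Int :=
  let v : List Int := 1 :: List.replicate n.toNat 0
  pvLoop2 n (pvPair n p) (PySem.Int.floordiv t 2).toNat v ((PySem.List.pyGet? v n).getD 0)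

-- ===== PRECONDITION & SPEC =====
-- Pre_ is exactly A's return domain: A raises IndexError when n < 0 or t < 0 (table
-- build / mem[0][0]), and, for n ≥ 1 and t ≥ 1, exactly when a negative coin occurs in
-- the prefix of p before the first coin > n (then mem[ti-1][i-c] is indexed past the row).
def Pre_coinChangeUsingEvenNumberOfCoins (n : Int) (p : List Int) (t : Int) : Prop :=
  0 ≤ n ∧ 0 ≤ t ∧
    (n = 0 ∨ t = 0 ∨ (p.takeWhile (fun c => decide (c ≤ n))).all (fun c => decide (0 ≤ c)) = true)
instance (n : Int) (p : List Int) (t : Int) : Decidable (Pre_coinChangeUsingEvenNumberOfCoins n p t) := by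
  unfold Pre_coinChangeUsingEvenNumberOfCoins; infer_instance

def pvWitness_coinChangeUsingEvenNumberOfCoins : Int × List Int × Int := (4, [1, 2], 5)

def Spec_coinChangeUsingEvenNumberOfCoins (n : Int) (p : List Int) (t : Int) (out : Int) : Prop := out = coinChangeUsingEvenNumberOfCoins_alt n p t
instance (n : Int) (p : List Int) (t : Int) (out : Int) : Decidable (Spec_coinChangeUsingEvenNumberOfCoins n p t out) := by unfold Spec_coinChangeUsingEvenNumberOfCoins; infer_instance

-- ===== CLAIM (what is proved, stated in full; the proofs are below) =====
def Claim_equal_coinChangeUsingEvenNumberOfCoins : Prop := ∀ (n : Int) (p : List Int) (t : Int), Dom_coinChangeUsingEvenNumberOfCoins n p t → Pre_coinChangeUsingEvenNumberOfCoins n p t → Spec_coinChangeUsingEvenNumberOfCoins n p t (coinChangeUsingEvenNumberOfCoins n p t)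

-- ===== LEMMAS AND PROOFS =====

-- B's break-loop over p = takeWhile
theorem pvUsable_eq (p : List Int) (i : Int) :
    pvUsable p i = p.takeWhile (fun c => decide (c ≤ i)) := by
  induction p with
  | nil => simp [pvUsable]
  | cons c rest ih =>
    by_cases h : c > i
    · simp [pvUsable, h, show ¬ c ≤ i by omega]
    · simp [pvUsable, h, show c ≤ i by omega, ih]

-- A's break-loop = fold over the mapped takeWhile prefix
theorem pvInnerA_eq (p : List Int) (i : Int) (prev : List Int) (acc : Int) :
    pvInnerA p i prev acc =
      acc + (((p.takeWhile (fun c => decide (c ≤ i))).map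
        (fun c => (PySem.List.pyGet? prev (i - c)).getD 0)).sum) := by
  induction p generalizing acc with
  | nil => simp [pvInnerA]
  | cons c rest ih =>
    by_cases h : c > i
    · simp [pvInnerA, h, show ¬ c ≤ i by omega]
    · simp [pvInnerA, h, show c ≤ i by omega, ih]
      ring

-- the flat list of two-step source amounts for amount i
def pvFlat (n : Int) (p : List Int) (i : Int) : List Int :=
  (p.takeWhile (fun c => decide (c ≤ i))).flatMap (fun c1 =>
    if 1 ≤ i - c1 ∧ i - c1 ≤ n then
      (p.takeWhile (fun c => decide (c ≤ i - c1))).map (fun c2 => (i - c1) - c2)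
    else [])

-- a Nodup-indexed sum of 'if k = x' picks out f x
theorem pvSumIte (s : List Int) (x : Int) (f : Int → Int)
    (hs : s.Nodup) (hx : x ∈ s) :
    (s.map (fun k => if k = x then f k else 0)).sum = f x := by
  induction s with
  | nil => simp at hx
  | cons a rest ih =>
    rcases List.mem_cons.mp hx with h | h
    · have hz : (rest.map (fun k => if k = x then f k else 0)).sum = 0 := by
        apply List.sum_eq_zero
        intro b hb
        rcases List.mem_map.mp hb with ⟨k, hk, rfl⟩
        have hne : k ≠ x := by
          rintro rfl; exact (List.nodup_cons.mp hs).1 (h ▸ hk)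
        simp [hne]
      simp [← h, hz]
    · have hna : a ≠ x := by rintro rfl; exact (List.nodup_cons.mp hs).1 h
      simp [hna, ih (List.nodup_cons.mp hs).2 h]

-- sum of f over a Nodup key list, counts drawn from xs
theorem pvSumCounts (s : List Int) (xs : List Int) (f : Int → Int)
    (hs : s.Nodup) (hmem : ∀ a ∈ xs, a ∈ s) :
    (s.map (fun k => (xs.count k : Int) * f k)).sum = (xs.map f).sum := by
  induction xs with
  | nil => simp
  | cons x rest ih =>
    have hsplit : ∀ k : Int, ((x :: rest).count k : Int) * f k
        = (rest.count k : Int) * f k + (if k = x then f k else 0) := by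
      intro k
      by_cases h : k = x
      · subst h; simp; ring
      · simp [List.count_cons, h]
        exact Or.inl (fun hk => h hk.symm)
    calc (s.map (fun k => ((x :: rest).count k : Int) * f k)).sum
        = (s.map (fun k => (rest.count k : Int) * f k + (if k = x then f k else 0))).sum := by
          exact congrArg _ (List.map_congr_left (fun k _ => hsplit k))
      _ = (s.map (fun k => (rest.count k : Int) * f k)).sum
            + (s.map (fun k => if k = x then f k else 0)).sum := by
          rw [← List.sum_map_add]
      _ = (rest.map f).sum + f x := by
          rw [ih (fun a ha => hmem a (List.mem_cons_of_mem _ ha)),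
              pvSumIte s x f hs (hmem x (List.mem_cons_self))]
      _ = ((x :: rest).map f).sum := by simp; ring

-- the nested insert-fold builds the counter of the flat list
-- us[i] resolves for 0 ≤ i ≤ n
theorem pvUs_get (n : Int) (p : List Int) (i : Int) (h0 : 0 ≤ i) (hn : i ≤ n) :
    (PySem.List.pyGet? (pvUs n p) i).getD [] = pvUsable p i := by
  show PySem.List.pyGetD (pvUs n p) i [] = _
  unfold pvUs
  rw [PySem.List.pyGetD_map_pyRange_of_nonneg _ (n + 1) i [] h0 (by omega)]

theorem pvPairD_eq_counter (n : Int) (p : List Int) (i : Int)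
    (h0 : 0 ≤ i) (hn : i ≤ n) :
    pvPairD (pvUs n p) n i = PySem.Dict.counter (pvFlat n p i) := by
  unfold pvPairD pvFlat
  rw [pvUs_get n p i h0 hn, pvUsable_eq]
  rw [← PySem.Dict.foldl_insert_getD_add_one_eq_counter, List.foldl_flatMap]
  congr 1
  funext d c1
  by_cases hc : 1 ≤ i - c1 ∧ i - c1 ≤ n
  · simp only [hc, if_pos, and_self]
    rw [pvUs_get n p (i - c1) (by omega) (by omega), pvUsable_eq, List.foldl_map]
  · rw [if_neg (by omega), if_neg (by omega)]
    simp

-- B's per-cell dict sum = plain sum over the flat list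
theorem pvCellB_eq (n : Int) (p : List Int) (i : Int) (v : List Int)
    (h0 : 0 ≤ i) (hn : i ≤ n) :
    ((pvPairD (pvUs n p) n i).items.foldl
        (fun s jm => s + jm.2 * (PySem.List.pyGet? v jm.1).getD 0) 0) =
      ((pvFlat n p i).map (fun j => (PySem.List.pyGet? v j).getD 0)).sum := by
  rw [pvPairD_eq_counter n p i h0 hn, PySem.Dict.items_counter, List.foldl_map,
      PySem.List.foldl_add]
  simpa using pvSumCounts (PySem.Set.ofList (pvFlat n p i)) (pvFlat n p i)
    (fun j => (PySem.List.pyGet? v j).getD 0)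
    (PySem.Set.nodup_ofList _) (fun a ha => (PySem.Set.mem_ofList _ a).mpr ha)

-- indexing A's freshly built row
theorem pvRowA_get_zero (n : Int) (p : List Int) (v : List Int) :
    (PySem.List.pyGet? (pvRowA n p v) 0).getD 0 = 0 := by
  rw [pvRowA, PySem.List.pyGet?_zero_cons]
  rfl

theorem pvRowA_get (n : Int) (p : List Int) (v : List Int) (r : Int)
    (h1 : 1 ≤ r) (hn : r ≤ n) :
    (PySem.List.pyGet? (pvRowA n p v) r).getD 0 = pvInnerA p r v 0 := by
  obtain ⟨k, rfl⟩ : ∃ k : Nat, r = (k : Int) + 1 := ⟨(r - 1).toNat, by omega⟩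
  unfold pvRowA
  rw [PySem.List.pyGet?_cons_succ]
  show PySem.List.pyGetD _ _ 0 = _
  rw [PySem.List.pyGetD_map_pyRange_one _ 1 (n + 1) k 0 (by omega)]
  congr 1
  omega

-- per-cell: the flat two-step sum equals two applications of A's row transition
theorem pvCell_eq (n : Int) (p : List Int) (i : Int) (v : List Int)
    (_h1 : 1 ≤ i) (hn : i ≤ n)
    (hnn : ∀ c ∈ p.takeWhile (fun c => decide (c ≤ i)), 0 ≤ c) :
    ((pvFlat n p i).map (fun j => (PySem.List.pyGet? v j).getD 0)).sum =
      pvInnerA p i (pvRowA n p v) 0 := by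
  rw [pvInnerA_eq]
  unfold pvFlat
  rw [List.map_flatMap]
  have hsum : ∀ (l : List Int) (f : Int → List Int),
      ((l.flatMap f).map (fun j => (PySem.List.pyGet? v j).getD 0)).sum
        = (l.map (fun a => ((f a).map (fun j => (PySem.List.pyGet? v j).getD 0)).sum)).sum := by
    intro l f
    induction l with
    | nil => simp
    | cons a rest ih => simp [ih]
  rw [← List.map_flatMap, hsum]
  simp only [zero_add]
  apply congrArg
  apply List.map_congr_left
  intro c1 hc1
  have hle : c1 ≤ i := by simpa using List.mem_takeWhile_imp hc1
  have hge : 0 ≤ c1 := hnn c1 hc1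
  by_cases hr : 1 ≤ i - c1
  · rw [if_pos ⟨hr, by omega⟩]
    rw [pvRowA_get n p v (i - c1) hr (by omega), pvInnerA_eq, List.map_map]
    simp only [zero_add, Function.comp_def]
  · have hr0 : i - c1 = 0 := by omega
    rw [if_neg (by omega), hr0, pvRowA_get_zero]
    simp

-- row level: one double-step of B = two steps of A
theorem pvStep2_eq (n : Int) (p : List Int) (v : List Int)
    (hnn : ∀ i, 1 ≤ i → i ≤ n → ∀ c ∈ p.takeWhile (fun c => decide (c ≤ i)), 0 ≤ c) :
    pvStep2 (pvPair n p) v = pvRowA n p (pvRowA n p v) := by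
  unfold pvStep2 pvPair
  show _ = pvRowA n p (pvRowA n p v)
  rw [List.map_map]
  unfold pvRowA
  congr 1
  apply List.map_congr_left
  intro i hi
  obtain ⟨hi1, hi2⟩ := (PySem.List.mem_pyRange_one).mp hi
  have h0 : (0:Int) ≤ i := by omega
  have hn : i ≤ n := by omega
  show ((pvPairD (pvUs n p) n i).items.foldl
      (fun s jm => s + jm.2 * (PySem.List.pyGet? v jm.1).getD 0) 0) = _
  rw [pvCellB_eq n p i v h0 hn, pvCell_eq n p i v hi1 hn (hnn i hi1 hn)]
  rfl

-- pvSumEvenA depends on idx only through its parity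
theorem pvSumEvenA_shift (n : Int) (idx : Int) (rows : List (List Int)) (acc : Int) :
    pvSumEvenA n (idx + 2) rows acc = pvSumEvenA n idx rows acc := by
  induction rows generalizing idx acc with
  | nil => simp [pvSumEvenA]
  | cons r rest ih =>
    simp only [pvSumEvenA]
    rw [show idx + 2 + 1 = idx + 1 + 2 by ring, ih]
    congr 2
    have : (idx + 2) % 2 = idx % 2 := by omega
    rw [this]

-- main loop correspondence: B's m double-steps = A's even-indexed tail sum
theorem pvLoop2_eq (n : Int) (p : List Int)
    (hnn : ∀ i, 1 ≤ i → i ≤ n → ∀ c ∈ p.takeWhile (fun c => decide (c ≤ i)), 0 ≤ c) :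
    ∀ (f : Nat) (v : List Int) (acc : Int),
      pvSumEvenA n 1 (pvRowsA n p f v) acc = pvLoop2 n (pvPair n p) (f / 2) v acc := by
  intro f
  induction f using Nat.strong_induction_on with
  | _ f ih =>
    match f with
    | 0 => intro v acc; simp [pvRowsA, pvSumEvenA, pvLoop2]
    | 1 =>
      intro v acc
      show pvSumEvenA n 1 [pvRowA n p v] acc = pvLoop2 n (pvPair n p) 0 v acc
      simp [pvSumEvenA, pvLoop2]
    | (f + 2) =>
      intro v acc
      have hrows : pvRowsA n p (f + 2) v
          = pvRowA n p v :: pvRowA n p (pvRowA n p v)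
              :: pvRowsA n p f (pvRowA n p (pvRowA n p v)) := rfl
      rw [hrows]
      simp only [pvSumEvenA]
      norm_num
      rw [show (3:Int) = 1 + 2 by ring, pvSumEvenA_shift]
      rw [ih f (by omega)]
      show _ = pvLoop2 n (pvPair n p) (f / 2)
        (pvStep2 (pvPair n p) v) (acc + (PySem.List.pyGet? (pvStep2 (pvPair n p) v) n).getD 0)
      rw [pvStep2_eq n p v hnn]

-- takeWhile (· ≤ i) members stay members for a larger bound
theorem pvTW_mono (p : List Int) (i j : Int) (hij : i ≤ j) :
    ∀ c ∈ p.takeWhile (fun c => decide (c ≤ i)), c ∈ p.takeWhile (fun c => decide (c ≤ j)) := by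
  induction p with
  | nil => simp
  | cons a rest ih =>
    by_cases ha : a ≤ i
    · intro c hc
      rcases List.mem_cons.mp (by simpa [ha] using hc) with h | h
      · simp [show a ≤ j by omega, h]
      · simp only [List.takeWhile_cons, show decide (a ≤ j) = true by simpa using by omega]
        exact List.mem_cons_of_mem _ (ih c h)
    · intro c hc
      simp [ha] at hc

-- ===== VERDICT (by name: the statement is the Claim_ definition above) =====
theorem coinChangeUsingEvenNumberOfCoins_spec : Claim_equal_coinChangeUsingEvenNumberOfCoins := by
  intro n p t _ hpre
  obtain ⟨hn0, ht0, hdisj⟩ := hpre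
  unfold Spec_coinChangeUsingEvenNumberOfCoins
  unfold coinChangeUsingEvenNumberOfCoins coinChangeUsingEvenNumberOfCoins_alt
  simp only [pvSumEvenA]
  norm_num
  have hfuel : ((t / 2 : Int)).toNat = t.toNat / 2 := by omega
  rw [hfuel]
  rcases hdisj with hz | hz | hall
  · -- n = 0 : the per-amount hypothesis is vacuous
    apply pvLoop2_eq
    intro i hi1 hi2
    omega
  · -- t = 0 : no loop iterations on either side
    rw [hz]
    simp [pvRowsA, pvSumEvenA, pvLoop2]
  · -- the usable prefixes contain only nonnegative coins
    apply pvLoop2_eq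
    intro i hi1 hi2 c hc
    have := pvTW_mono p i n hi2 c hc
    simpa using List.all_eq_true.mp hall c (by simpa using this)
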